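-- pv_equiv track=rewrite | github.com/cmphan/COSC4315 | Assignment_1/keywords.py | get_min_frequency
-- ===== SOURCE A (Python) =====
-- def get_min_frequency(list_2d, index=0, min_frequency=1001):
--     if(index>=len(list_2d)):
--         return min_frequency
--     else:
--         if(list_2d[index][1]<min_frequency):
--             min_frequency = list_2d[index][1]
--         index = index +1
--         return get_min_frequency(list_2d,index,min_frequency)
-- ===== SOURCE B (Python) =====
-- def get_min_frequency(list_2d, index=0, min_frequency=1001):
--     for i in range(index, len(list_2d)):
--         f = list_2d[i][1]
--         if f < min_frequency:
--             min_frequency = f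
--     return min_frequency
-- ===== Notes on version B (the rewrite author's own statement) =====
-- stated objective: simpler
-- what changed: Replaces A's tail recursion (one Python call frame per row) with a single iterative for-loop over range(index, len(list_2d)) updating the running minimum in place.
import Mathlib
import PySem

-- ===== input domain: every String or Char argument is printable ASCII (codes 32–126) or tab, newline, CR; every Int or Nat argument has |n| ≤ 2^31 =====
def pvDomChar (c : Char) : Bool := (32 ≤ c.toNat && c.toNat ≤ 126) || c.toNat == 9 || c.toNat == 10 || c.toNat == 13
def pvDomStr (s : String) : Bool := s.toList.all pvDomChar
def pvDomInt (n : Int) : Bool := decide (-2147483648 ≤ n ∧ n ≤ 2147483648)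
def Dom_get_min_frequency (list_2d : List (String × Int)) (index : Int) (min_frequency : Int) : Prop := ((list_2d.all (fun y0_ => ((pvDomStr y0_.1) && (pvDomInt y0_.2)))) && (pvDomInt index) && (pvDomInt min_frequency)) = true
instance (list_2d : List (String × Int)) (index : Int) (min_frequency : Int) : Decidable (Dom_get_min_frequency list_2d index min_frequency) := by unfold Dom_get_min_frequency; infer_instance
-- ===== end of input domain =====

-- B replaces A's tail recursion by a single iterative loop over range(index, len); same values, O(1) space.
-- ===== PORT A =====
def get_min_frequency (list_2d : List (String × Int)) (index : Int) (min_frequency : Int) : Int :=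
  if (list_2d.length : Int) ≤ index then min_frequency
  else
    -- list_2d[index][1]; the `none` branch is Python's IndexError, excluded by Pre_
    let min_frequency' :=
      match PySem.List.pyGet? list_2d index with
      | some p => if p.2 < min_frequency then p.2 else min_frequency
      | none => min_frequency
    get_min_frequency list_2d (index + 1) min_frequency'
termination_by ((list_2d.length : Int) - index).toNat
decreasing_by omega

-- ===== PORT B =====
def get_min_frequency_alt (list_2d : List (String × Int)) (index : Int) (min_frequency : Int) : Int :=
  (PySem.List.pyRange index list_2d.length 1).foldl
    (fun acc i =>
      match PySem.List.pyGet? list_2d i with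
      | some p => if p.2 < acc then p.2 else acc
      | none => acc) min_frequency

-- ===== PRECONDITION & SPEC =====
-- Pre_ excludes indices below -len(list_2d) with index < len, where Python's list_2d[index] raises IndexError in both A and B.
def Pre_get_min_frequency (list_2d : List (String × Int)) (index : Int) (min_frequency : Int) : Prop :=
  -(list_2d.length : Int) ≤ index
instance (list_2d : List (String × Int)) (index : Int) (min_frequency : Int) : Decidable (Pre_get_min_frequency list_2d index min_frequency) := by unfold Pre_get_min_frequency; infer_instance
def pvWitness_get_min_frequency : (List (String × Int)) × Int × Int := ([("a", 3), ("b", 1)], 0, 1001)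
def Spec_get_min_frequency (list_2d : List (String × Int)) (index : Int) (min_frequency : Int) (out : Int) : Prop := out = get_min_frequency_alt list_2d index min_frequency
instance (list_2d : List (String × Int)) (index : Int) (min_frequency : Int) (out : Int) : Decidable (Spec_get_min_frequency list_2d index min_frequency out) := by unfold Spec_get_min_frequency; infer_instance

-- ===== CLAIM (what is proved, stated in full; the proofs are below) =====
def Claim_equal_get_min_frequency : Prop := ∀ (list_2d : List (String × Int)) (index : Int) (min_frequency : Int), Dom_get_min_frequency list_2d index min_frequency → Pre_get_min_frequency list_2d index min_frequency → Spec_get_min_frequency list_2d index min_frequency (get_min_frequency list_2d index min_frequency)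

-- ===== LEMMAS AND PROOFS =====
theorem gmf_eq_alt (list_2d : List (String × Int)) (index min_frequency : Int) :
    get_min_frequency list_2d index min_frequency = get_min_frequency_alt list_2d index min_frequency := by
  by_cases h : (list_2d.length : Int) ≤ index
  · rw [get_min_frequency, if_pos h]
    unfold get_min_frequency_alt
    rw [PySem.List.pyRange_one_eq_nil h]
    rfl
  · rw [get_min_frequency, if_neg h, gmf_eq_alt list_2d (index + 1)]
    unfold get_min_frequency_alt
    rw [PySem.List.pyRange_one_cons (by omega : index < (list_2d.length : Int))]
    rfl
termination_by ((list_2d.length : Int) - index).toNat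
decreasing_by omega

-- ===== VERDICT (by name: the statement is the Claim_ definition above) =====
theorem get_min_frequency_spec : Claim_equal_get_min_frequency := by
  intro list_2d index min_frequency _ _
  exact gmf_eq_alt list_2d index min_frequency
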